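-- pv_equiv track=rewrite | github.com/Gshimabuku/streamlit_books_library | utils/kana_converter.py | romaji_to_hiragana
-- ===== SOURCE A (Python) =====
-- def romaji_to_hiragana(text: str) -> str:
--     """
--     ローマ字をひらがなに変換する
--     英語の単語も可能な限り日本語発音に近づける
--     """
--     # ローマ字→ひらがな変換テーブル
--     romaji_map = {
--         # 4文字のローマ字
--         'tchi': 'っち',
--         # 3文字のローマ字（長い方から優先）
--         'kya': 'きゃ', 'kyu': 'きゅ', 'kyo': 'きょ',
--         'sha': 'しゃ', 'shu': 'しゅ', 'sho': 'しょ', 'shi': 'し',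
--         'cha': 'ちゃ', 'chu': 'ちゅ', 'cho': 'ちょ', 'chi': 'ち',
--         'nya': 'にゃ', 'nyu': 'にゅ', 'nyo': 'にょ',
--         'hya': 'ひゃ', 'hyu': 'ひゅ', 'hyo': 'ひょ',
--         'mya': 'みゃ', 'myu': 'みゅ', 'myo': 'みょ',
--         'rya': 'りゃ', 'ryu': 'りゅ', 'ryo': 'りょ',
--         'gya': 'ぎゃ', 'gyu': 'ぎゅ', 'gyo': 'ぎょ',
--         'jya': 'じゃ', 'jyu': 'じゅ', 'jyo': 'じょ',
--         'bya': 'びゃ', 'byu': 'びゅ', 'byo': 'びょ',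
--         'pya': 'ぴゃ', 'pyu': 'ぴゅ', 'pyo': 'ぴょ',
--         'tsu': 'つ', 'dzu': 'づ',
--         'tth': 'っす', 'cch': 'っち', 'cck': 'っく',
--         # 2文字のローマ字
--         'ka': 'か', 'ki': 'き', 'ku': 'く', 'ke': 'け', 'ko': 'こ',
--         'sa': 'さ', 'si': 'し', 'su': 'す', 'se': 'せ', 'so': 'そ',
--         'ta': 'た', 'ti': 'ち', 'tu': 'つ', 'te': 'て', 'to': 'と',
--         'na': 'な', 'ni': 'に', 'nu': 'ぬ', 'ne': 'ね', 'no': 'の',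
--         'ha': 'は', 'hi': 'ひ', 'hu': 'ふ', 'fu': 'ふ', 'he': 'へ', 'ho': 'ほ',
--         'ma': 'ま', 'mi': 'み', 'mu': 'む', 'me': 'め', 'mo': 'も',
--         'ya': 'や', 'yi': 'い', 'yu': 'ゆ', 'ye': 'いぇ', 'yo': 'よ',
--         'ra': 'ら', 'ri': 'り', 'ru': 'る', 're': 'れ', 'ro': 'ろ',
--         'la': 'ら', 'li': 'り', 'lu': 'る', 'le': 'れ', 'lo': 'ろ',
--         'wa': 'わ', 'wi': 'うぃ', 'wu': 'う', 'we': 'うぇ', 'wo': 'を',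
--         'ga': 'が', 'gi': 'ぎ', 'gu': 'ぐ', 'ge': 'げ', 'go': 'ご',
--         'za': 'ざ', 'zi': 'じ', 'zu': 'ず', 'ze': 'ぜ', 'zo': 'ぞ',
--         'ja': 'じゃ', 'ji': 'じ', 'ju': 'じゅ', 'je': 'じぇ', 'jo': 'じょ',
--         'da': 'だ', 'di': 'ぢ', 'du': 'づ', 'de': 'で', 'do': 'ど',
--         'ba': 'ば', 'bi': 'び', 'bu': 'ぶ', 'be': 'べ', 'bo': 'ぼ',
--         'pa': 'ぱ', 'pi': 'ぴ', 'pu': 'ぷ', 'pe': 'ぺ', 'po': 'ぽ',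
--         'va': 'ゔぁ', 'vi': 'ゔぃ', 'vu': 'ゔ', 've': 'ゔぇ', 'vo': 'ゔぉ',
--         'fa': 'ふぁ', 'fi': 'ふぃ', 'fe': 'ふぇ', 'fo': 'ふぉ',
--         # 英語でよく使われる組み合わせ
--         'th': 'す', 'dh': 'ず', 'ng': 'んぐ',
--         # 1文字
--         'a': 'あ', 'i': 'い', 'u': 'う', 'e': 'え', 'o': 'お',
--         'n': 'ん', 'l': 'る', 'r': 'る', 'v': 'ゔ', 'f': 'ふ',
--         'x': 'くす', 'q': 'く', 'c': 'く', 'd': 'ど', 'g': 'ぐ',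
--         'b': 'ぶ', 'p': 'ぷ', 's': 'す', 't': 'と', 'y': 'い', 'w': 'う',
--     }
--
--     result = []
--     text_lower = text.lower()
--     i = 0
--
--     while i < len(text_lower):
--         matched = False
--         # 長いローマ字から順に試す（4文字、3文字、2文字、1文字）
--         for length in [4, 3, 2, 1]:
--             if i + length <= len(text_lower):
--                 substr = text_lower[i:i+length]
--                 if substr in romaji_map:
--                     result.append(romaji_map[substr])
--                     i += length
--                     matched = True
--                     break
--
--         if not matched:
--             # 変換できない文字（スペースや記号など）はそのまま
--             result.append(text_lower[i])
--             i += 1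
--
--     return ''.join(result)
-- ===== SOURCE B (Python) =====
-- # Conversion table as space-separated entries, parsed into a dict at import time.
-- _TABLE = [
--     'tchi っち', 'kya きゃ', 'kyu きゅ', 'kyo きょ', 'sha しゃ', 'shu しゅ',
--     'sho しょ', 'shi し', 'cha ちゃ', 'chu ちゅ', 'cho ちょ', 'chi ち',
--     'nya にゃ', 'nyu にゅ', 'nyo にょ', 'hya ひゃ', 'hyu ひゅ', 'hyo ひょ',
--     'mya みゃ', 'myu みゅ', 'myo みょ', 'rya りゃ', 'ryu りゅ', 'ryo りょ',
--     'gya ぎゃ', 'gyu ぎゅ', 'gyo ぎょ', 'jya じゃ', 'jyu じゅ', 'jyo じょ',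
--     'bya びゃ', 'byu びゅ', 'byo びょ', 'pya ぴゃ', 'pyu ぴゅ', 'pyo ぴょ',
--     'tsu つ', 'dzu づ', 'tth っす', 'cch っち', 'cck っく', 'ka か',
--     'ki き', 'ku く', 'ke け', 'ko こ', 'sa さ', 'si し',
--     'su す', 'se せ', 'so そ', 'ta た', 'ti ち', 'tu つ',
--     'te て', 'to と', 'na な', 'ni に', 'nu ぬ', 'ne ね',
--     'no の', 'ha は', 'hi ひ', 'hu ふ', 'fu ふ', 'he へ',
--     'ho ほ', 'ma ま', 'mi み', 'mu む', 'me め', 'mo も',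
--     'ya や', 'yi い', 'yu ゆ', 'ye いぇ', 'yo よ', 'ra ら',
--     'ri り', 'ru る', 're れ', 'ro ろ', 'la ら', 'li り',
--     'lu る', 'le れ', 'lo ろ', 'wa わ', 'wi うぃ', 'wu う',
--     'we うぇ', 'wo を', 'ga が', 'gi ぎ', 'gu ぐ', 'ge げ',
--     'go ご', 'za ざ', 'zi じ', 'zu ず', 'ze ぜ', 'zo ぞ',
--     'ja じゃ', 'ji じ', 'ju じゅ', 'je じぇ', 'jo じょ', 'da だ',
--     'di ぢ', 'du づ', 'de で', 'do ど', 'ba ば', 'bi び',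
--     'bu ぶ', 'be べ', 'bo ぼ', 'pa ぱ', 'pi ぴ', 'pu ぷ',
--     'pe ぺ', 'po ぽ', 'va ゔぁ', 'vi ゔぃ', 'vu ゔ', 've ゔぇ',
--     'vo ゔぉ', 'fa ふぁ', 'fi ふぃ', 'fe ふぇ', 'fo ふぉ', 'th す',
--     'dh ず', 'ng んぐ', 'a あ', 'i い', 'u う', 'e え',
--     'o お', 'n ん', 'l る', 'r る', 'v ゔ', 'f ふ',
--     'x くす', 'q く', 'c く', 'd ど', 'g ぐ', 'b ぶ',
--     'p ぷ', 's す', 't と', 'y い', 'w う',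
-- ]
--
-- _MAP = dict(entry.split() for entry in _TABLE)
--
-- import re
--
-- # One alternation regex, longest keys first: regex first-match semantics then
-- # reproduce greedy longest-match at each position; unmatched chars pass through.
-- _PATTERN = re.compile('|'.join(sorted(_MAP, key=len, reverse=True)))
--
--
-- def romaji_to_hiragana(text: str) -> str:
--     """ローマ字をひらがなに変換する（正規表現による一括置換）"""
--     return _PATTERN.sub(lambda m: _MAP[m.group()], text.lower())
-- ===== Notes on version B (the rewrite author's own statement) =====
-- stated objective: idiomatic
-- what changed: Replaces the hand-written per-position loop that probes substring lengths 4,3,2,1 against the dict literal with a table of space-separated entries parsed into a dict at import time plus one precompiled alternation regex (keys sorted longest-first) applied by a single re.sub over the lowercased text; unmatched characters pass through untouched.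
import Mathlib
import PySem

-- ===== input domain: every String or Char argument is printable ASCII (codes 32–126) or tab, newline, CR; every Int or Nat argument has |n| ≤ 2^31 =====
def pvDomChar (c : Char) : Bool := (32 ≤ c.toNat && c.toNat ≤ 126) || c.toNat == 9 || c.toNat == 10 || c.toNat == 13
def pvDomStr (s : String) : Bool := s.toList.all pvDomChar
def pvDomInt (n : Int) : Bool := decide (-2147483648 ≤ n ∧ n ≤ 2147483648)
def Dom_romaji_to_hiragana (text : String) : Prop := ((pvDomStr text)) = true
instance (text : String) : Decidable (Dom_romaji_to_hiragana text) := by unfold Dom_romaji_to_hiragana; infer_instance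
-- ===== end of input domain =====

set_option maxRecDepth 16384
set_option maxHeartbeats 1000000

-- B stores the table as one parsed text block and replaces A's per-position length-4..1 probing
-- loop by one regex-style substitution over keys sorted longest-first (idiomatic re.sub one-liner).

-- ===== PORT A =====
def romajiPairs : List (String × String) := [
    ("tchi", "っち"), ("kya", "きゃ"), ("kyu", "きゅ"), ("kyo", "きょ"), ("sha", "しゃ"),
    ("shu", "しゅ"), ("sho", "しょ"), ("shi", "し"), ("cha", "ちゃ"), ("chu", "ちゅ"),
    ("cho", "ちょ"), ("chi", "ち"), ("nya", "にゃ"), ("nyu", "にゅ"), ("nyo", "にょ"),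
    ("hya", "ひゃ"), ("hyu", "ひゅ"), ("hyo", "ひょ"), ("mya", "みゃ"), ("myu", "みゅ"),
    ("myo", "みょ"), ("rya", "りゃ"), ("ryu", "りゅ"), ("ryo", "りょ"), ("gya", "ぎゃ"),
    ("gyu", "ぎゅ"), ("gyo", "ぎょ"), ("jya", "じゃ"), ("jyu", "じゅ"), ("jyo", "じょ"),
    ("bya", "びゃ"), ("byu", "びゅ"), ("byo", "びょ"), ("pya", "ぴゃ"), ("pyu", "ぴゅ"),
    ("pyo", "ぴょ"), ("tsu", "つ"), ("dzu", "づ"), ("tth", "っす"), ("cch", "っち"),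
    ("cck", "っく"), ("ka", "か"), ("ki", "き"), ("ku", "く"), ("ke", "け"),
    ("ko", "こ"), ("sa", "さ"), ("si", "し"), ("su", "す"), ("se", "せ"),
    ("so", "そ"), ("ta", "た"), ("ti", "ち"), ("tu", "つ"), ("te", "て"),
    ("to", "と"), ("na", "な"), ("ni", "に"), ("nu", "ぬ"), ("ne", "ね"),
    ("no", "の"), ("ha", "は"), ("hi", "ひ"), ("hu", "ふ"), ("fu", "ふ"),
    ("he", "へ"), ("ho", "ほ"), ("ma", "ま"), ("mi", "み"), ("mu", "む"),
    ("me", "め"), ("mo", "も"), ("ya", "や"), ("yi", "い"), ("yu", "ゆ"),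
    ("ye", "いぇ"), ("yo", "よ"), ("ra", "ら"), ("ri", "り"), ("ru", "る"),
    ("re", "れ"), ("ro", "ろ"), ("la", "ら"), ("li", "り"), ("lu", "る"),
    ("le", "れ"), ("lo", "ろ"), ("wa", "わ"), ("wi", "うぃ"), ("wu", "う"),
    ("we", "うぇ"), ("wo", "を"), ("ga", "が"), ("gi", "ぎ"), ("gu", "ぐ"),
    ("ge", "げ"), ("go", "ご"), ("za", "ざ"), ("zi", "じ"), ("zu", "ず"),
    ("ze", "ぜ"), ("zo", "ぞ"), ("ja", "じゃ"), ("ji", "じ"), ("ju", "じゅ"),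
    ("je", "じぇ"), ("jo", "じょ"), ("da", "だ"), ("di", "ぢ"), ("du", "づ"),
    ("de", "で"), ("do", "ど"), ("ba", "ば"), ("bi", "び"), ("bu", "ぶ"),
    ("be", "べ"), ("bo", "ぼ"), ("pa", "ぱ"), ("pi", "ぴ"), ("pu", "ぷ"),
    ("pe", "ぺ"), ("po", "ぽ"), ("va", "ゔぁ"), ("vi", "ゔぃ"), ("vu", "ゔ"),
    ("ve", "ゔぇ"), ("vo", "ゔぉ"), ("fa", "ふぁ"), ("fi", "ふぃ"), ("fe", "ふぇ"),
    ("fo", "ふぉ"), ("th", "す"), ("dh", "ず"), ("ng", "んぐ"), ("a", "あ"),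
    ("i", "い"), ("u", "う"), ("e", "え"), ("o", "お"), ("n", "ん"),
    ("l", "る"), ("r", "る"), ("v", "ゔ"), ("f", "ふ"), ("x", "くす"),
    ("q", "く"), ("c", "く"), ("d", "ど"), ("g", "ぐ"), ("b", "ぶ"),
    ("p", "ぷ"), ("s", "す"), ("t", "と"), ("y", "い"), ("w", "う")]


def rmapA : PySem.Dict String String := PySem.Dict.ofList romajiPairs

-- inner `for length in [4, 3, 2, 1]` with its break, returning (kana, consumed length)
def tryLens (rest : List Char) : List Nat → Option (String × Nat)
  | [] => none
  | L :: ls =>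
    if L ≤ rest.length then
      if rmapA.contains (String.ofList (rest.take L)) = true then
        some (rmapA.getD (String.ofList (rest.take L)) "", L)
      else tryLens rest ls
    else tryLens rest ls

-- the `while i < len(text_lower)` loop, over the remaining characters;
-- fuel = remaining length makes it total (each iteration consumes at least 1 char)
def loopA : Nat → List Char → List String
  | 0, _ => []
  | _ + 1, [] => []
  | fuel + 1, c :: tl =>
    match tryLens (c :: tl) [4, 3, 2, 1] with
    | some (kana, L) => kana :: loopA fuel ((c :: tl).drop L)
    | none => String.ofList [c] :: loopA fuel tl

def romaji_to_hiragana (text : String) : String :=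
  PySem.Str.join "" (loopA (PySem.Str.lower text).toList.length (PySem.Str.lower text).toList)

-- ===== PORT B =====
-- the `_TABLE` entry list (space-separated romaji/kana pairs)
def tableB : List String := [
    "tchi っち", "kya きゃ", "kyu きゅ", "kyo きょ", "sha しゃ", "shu しゅ",
    "sho しょ", "shi し", "cha ちゃ", "chu ちゅ", "cho ちょ", "chi ち",
    "nya にゃ", "nyu にゅ", "nyo にょ", "hya ひゃ", "hyu ひゅ", "hyo ひょ",
    "mya みゃ", "myu みゅ", "myo みょ", "rya りゃ", "ryu りゅ", "ryo りょ",
    "gya ぎゃ", "gyu ぎゅ", "gyo ぎょ", "jya じゃ", "jyu じゅ", "jyo じょ",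
    "bya びゃ", "byu びゅ", "byo びょ", "pya ぴゃ", "pyu ぴゅ", "pyo ぴょ",
    "tsu つ", "dzu づ", "tth っす", "cch っち", "cck っく", "ka か",
    "ki き", "ku く", "ke け", "ko こ", "sa さ", "si し",
    "su す", "se せ", "so そ", "ta た", "ti ち", "tu つ",
    "te て", "to と", "na な", "ni に", "nu ぬ", "ne ね",
    "no の", "ha は", "hi ひ", "hu ふ", "fu ふ", "he へ",
    "ho ほ", "ma ま", "mi み", "mu む", "me め", "mo も",
    "ya や", "yi い", "yu ゆ", "ye いぇ", "yo よ", "ra ら",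
    "ri り", "ru る", "re れ", "ro ろ", "la ら", "li り",
    "lu る", "le れ", "lo ろ", "wa わ", "wi うぃ", "wu う",
    "we うぇ", "wo を", "ga が", "gi ぎ", "gu ぐ", "ge げ",
    "go ご", "za ざ", "zi じ", "zu ず", "ze ぜ", "zo ぞ",
    "ja じゃ", "ji じ", "ju じゅ", "je じぇ", "jo じょ", "da だ",
    "di ぢ", "du づ", "de で", "do ど", "ba ば", "bi び",
    "bu ぶ", "be べ", "bo ぼ", "pa ぱ", "pi ぴ", "pu ぷ",
    "pe ぺ", "po ぽ", "va ゔぁ", "vi ゔぃ", "vu ゔ", "ve ゔぇ",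
    "vo ゔぉ", "fa ふぁ", "fi ふぃ", "fe ふぇ", "fo ふぉ", "th す",
    "dh ず", "ng んぐ", "a あ", "i い", "u う", "e え",
    "o お", "n ん", "l る", "r る", "v ゔ", "f ふ",
    "x くす", "q く", "c く", "d ど", "g ぐ", "b ぶ",
    "p ぷ", "s す", "t と", "y い", "w う"]

-- `dict(entry.split() for entry in _TABLE)` (each entry has exactly two fields, so the
-- two-element match is the successful tuple unpacking; the fallback is unreachable)
def pairsB : List (String × String) :=
  tableB.map (fun entry =>
    match PySem.Str.split₀ entry with
    | [k, v] => (k, v)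
    | _ => ("", ""))

def mapB : PySem.Dict String String := PySem.Dict.ofList pairsB

-- `sorted(_MAP, key=len, reverse=True)`
def keysB : List String := PySem.List.sorted mapB.keys (fun k => PySem.Str.len k) true

-- hand port of `_PATTERN.sub(lambda m: _MAP[m.group()], ·)` for the literal alternation of
-- the keys (plain letter keys, no metacharacters, longest-first): the regex scans left to right;
-- at each position the first alternative that matches is replaced, otherwise the character passes
-- through — exact for this pattern. fuel = remaining length for totality.
def regexSub : Nat → List Char → List Char
  | 0, _ => []
  | _ + 1, [] => []
  | fuel + 1, c :: tl =>
    match keysB.find? (fun k => k.toList.isPrefixOf (c :: tl)) with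
    | some k => (mapB.getD k "").toList ++ regexSub fuel ((c :: tl).drop k.toList.length)
    | none => c :: regexSub fuel tl

def romaji_to_hiragana_alt (text : String) : String :=
  String.ofList (regexSub (PySem.Str.lower text).toList.length (PySem.Str.lower text).toList)

-- ===== PRECONDITION & SPEC =====
def Spec_romaji_to_hiragana (text : String) (out : String) : Prop := out = romaji_to_hiragana_alt text
instance (text : String) (out : String) : Decidable (Spec_romaji_to_hiragana text out) := by
  unfold Spec_romaji_to_hiragana; infer_instance

-- ===== CLAIM (what is proved, stated in full; the proofs are below) =====
def Claim_equal_romaji_to_hiragana : Prop :=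
  ∀ (text : String), Dom_romaji_to_hiragana text → Spec_romaji_to_hiragana text (romaji_to_hiragana text)

-- ===== LEMMAS AND PROOFS =====

theorem pairsB_eq : pairsB = romajiPairs := by decide

theorem mapB_eq : mapB = rmapA := by
  unfold mapB rmapA; rw [pairsB_eq]

-- the four length segments of the key list (proof-only helpers)
def K4 : List String := [
    "tchi"]

def K3 : List String := [
    "kya", "kyu", "kyo", "sha", "shu", "sho", "shi", "cha", "chu", "cho",
    "chi", "nya", "nyu", "nyo", "hya", "hyu", "hyo", "mya", "myu", "myo",
    "rya", "ryu", "ryo", "gya", "gyu", "gyo", "jya", "jyu", "jyo", "bya",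
    "byu", "byo", "pya", "pyu", "pyo", "tsu", "dzu", "tth", "cch", "cck"]

def K2 : List String := [
    "ka", "ki", "ku", "ke", "ko", "sa", "si", "su", "se", "so",
    "ta", "ti", "tu", "te", "to", "na", "ni", "nu", "ne", "no",
    "ha", "hi", "hu", "fu", "he", "ho", "ma", "mi", "mu", "me",
    "mo", "ya", "yi", "yu", "ye", "yo", "ra", "ri", "ru", "re",
    "ro", "la", "li", "lu", "le", "lo", "wa", "wi", "wu", "we",
    "wo", "ga", "gi", "gu", "ge", "go", "za", "zi", "zu", "ze",
    "zo", "ja", "ji", "ju", "je", "jo", "da", "di", "du", "de",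
    "do", "ba", "bi", "bu", "be", "bo", "pa", "pi", "pu", "pe",
    "po", "va", "vi", "vu", "ve", "vo", "fa", "fi", "fe", "fo",
    "th", "dh", "ng"]

def K1 : List String := [
    "a", "i", "u", "e", "o", "n", "l", "r", "v", "f",
    "x", "q", "c", "d", "g", "b", "p", "s", "t", "y",
    "w"]


theorem keys_rmapA : rmapA.keys = K4 ++ K3 ++ K2 ++ K1 := by decide

theorem keysB_eq : keysB = K4 ++ K3 ++ K2 ++ K1 := by
  unfold keysB
  rw [mapB_eq, show rmapA.keys = K4 ++ K3 ++ K2 ++ K1 from keys_rmapA]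
  apply PySem.List.sorted_rev_eq_self_of_pairwise
  decide

theorem len_K4 : ∀ k ∈ K4, k.toList.length = 4 := by decide
theorem len_K3 : ∀ k ∈ K3, k.toList.length = 3 := by decide
theorem len_K2 : ∀ k ∈ K2, k.toList.length = 2 := by decide
theorem len_K1 : ∀ k ∈ K1, k.toList.length = 1 := by decide

theorem all_K4 : ∀ k ∈ K4 ++ K3 ++ K2 ++ K1, k.toList.length = 4 → k ∈ K4 := by decide
theorem all_K3 : ∀ k ∈ K4 ++ K3 ++ K2 ++ K1, k.toList.length = 3 → k ∈ K3 := by decide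
theorem all_K2 : ∀ k ∈ K4 ++ K3 ++ K2 ++ K1, k.toList.length = 2 → k ∈ K2 := by decide
theorem all_K1 : ∀ k ∈ K4 ++ K3 ++ K2 ++ K1, k.toList.length = 1 → k ∈ K1 := by decide

theorem sub_K4 : ∀ k ∈ K4, k ∈ K4 ++ K3 ++ K2 ++ K1 := by decide
theorem sub_K3 : ∀ k ∈ K3, k ∈ K4 ++ K3 ++ K2 ++ K1 := by decide
theorem sub_K2 : ∀ k ∈ K2, k ∈ K4 ++ K3 ++ K2 ++ K1 := by decide
theorem sub_K1 : ∀ k ∈ K1, k ∈ K4 ++ K3 ++ K2 ++ K1 := by decide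

theorem contains_iff_memAll (s : String) :
    rmapA.contains s = true ↔ s ∈ K4 ++ K3 ++ K2 ++ K1 := by
  rw [PySem.Dict.contains_iff_mem_keys, keys_rmapA]

-- A's test `n ≤ |l| ∧ take n l ∈ dict` coincides with `take n l ∈ Kn`
theorem condN (n : Nat) (K : List String)
    (h1 : ∀ k ∈ K, k.toList.length = n)
    (h2 : ∀ k ∈ K4 ++ K3 ++ K2 ++ K1, k.toList.length = n → k ∈ K)
    (h3 : ∀ k ∈ K, k ∈ K4 ++ K3 ++ K2 ++ K1)
    (l : List Char) :
    (n ≤ l.length ∧ rmapA.contains (String.ofList (l.take n)) = true) ↔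
      String.ofList (l.take n) ∈ K := by
  constructor
  · rintro ⟨hn, hc⟩
    refine h2 _ ((contains_iff_memAll _).1 hc) ?_
    simp [List.length_take, hn]
  · intro hm
    have hlen := h1 _ hm
    rw [String.toList_ofList, List.length_take] at hlen
    refine ⟨by omega, (contains_iff_memAll _).2 (h3 _ hm)⟩

-- find? over a list of keys all of one length n picks out exactly take n l
theorem find_const_len (n : Nat) (K : List String) (h1 : ∀ k ∈ K, k.toList.length = n)
    (l : List Char) :
    K.find? (fun k => k.toList.isPrefixOf l) =
      if String.ofList (l.take n) ∈ K then some (String.ofList (l.take n)) else none := by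
  induction K with
  | nil => simp
  | cons a K ih =>
    have ha : a.toList.length = n := h1 a (by simp)
    have ihK := ih (fun k hk => h1 k (by simp [hk]))
    by_cases hEq : a = String.ofList (l.take n)
    · have hpre : a.toList.isPrefixOf l = true := by
        rw [List.isPrefixOf_iff_prefix, hEq, String.toList_ofList]
        apply List.take_prefix
      rw [List.find?_cons_of_pos (by simpa using hpre), hEq,
          if_pos (show String.ofList (l.take n) ∈ String.ofList (l.take n) :: K from
            List.mem_cons_self)]
    · have hpre : ¬ (a.toList.isPrefixOf l = true) := by
        intro h
        have h' : a.toList <+: l := List.isPrefixOf_iff_prefix.mp h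
        have htk := List.prefix_iff_eq_take.mp h'
        rw [ha] at htk
        refine hEq ?_
        rw [← htk]
        simp
      have hmem : (String.ofList (l.take n) ∈ a :: K) ↔ String.ofList (l.take n) ∈ K := by
        rw [List.mem_cons]
        refine ⟨?_, Or.inr⟩
        rintro (h | h)
        · exact absurd h.symm hEq
        · exact h
      rw [List.find?_cons_of_neg (by simpa using hpre), ihK]
      by_cases hm : String.ofList (l.take n) ∈ K
      · rw [if_pos hm, if_pos (hmem.2 hm)]
      · rw [if_neg hm, if_neg (fun h => hm (hmem.1 h))]

theorem tryLens_cons (n : Nat) (K : List String)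
    (h1 : ∀ k ∈ K, k.toList.length = n)
    (h2 : ∀ k ∈ K4 ++ K3 ++ K2 ++ K1, k.toList.length = n → k ∈ K)
    (h3 : ∀ k ∈ K, k ∈ K4 ++ K3 ++ K2 ++ K1)
    (l : List Char) (ls : List Nat) :
    tryLens l (n :: ls) =
      if String.ofList (l.take n) ∈ K then
        some (rmapA.getD (String.ofList (l.take n)) "", n)
      else tryLens l ls := by
  have hc := condN n K h1 h2 h3 l
  rw [tryLens]
  by_cases hm : String.ofList (l.take n) ∈ K
  · obtain ⟨h4, h5⟩ := hc.mpr hm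
    rw [if_pos h4, if_pos h5, if_pos hm]
  · rw [if_neg hm]
    by_cases h4 : n ≤ l.length
    · rw [if_pos h4]
      by_cases h5 : rmapA.contains (String.ofList (l.take n)) = true
      · exact absurd (hc.mp ⟨h4, h5⟩) hm
      · rw [if_neg h5]
    · rw [if_neg h4]

theorem tryLens_all (l : List Char) :
    tryLens l [4, 3, 2, 1] =
      if String.ofList (l.take 4) ∈ K4 then some (rmapA.getD (String.ofList (l.take 4)) "", 4)
      else if String.ofList (l.take 3) ∈ K3 then some (rmapA.getD (String.ofList (l.take 3)) "", 3)
      else if String.ofList (l.take 2) ∈ K2 then some (rmapA.getD (String.ofList (l.take 2)) "", 2)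
      else if String.ofList (l.take 1) ∈ K1 then some (rmapA.getD (String.ofList (l.take 1)) "", 1)
      else none := by
  rw [tryLens_cons 4 K4 len_K4 all_K4 sub_K4,
      tryLens_cons 3 K3 len_K3 all_K3 sub_K3,
      tryLens_cons 2 K2 len_K2 all_K2 sub_K2,
      tryLens_cons 1 K1 len_K1 all_K1 sub_K1]
  rfl

theorem findB (l : List Char) :
    keysB.find? (fun k => k.toList.isPrefixOf l) =
      if String.ofList (l.take 4) ∈ K4 then some (String.ofList (l.take 4))
      else if String.ofList (l.take 3) ∈ K3 then some (String.ofList (l.take 3))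
      else if String.ofList (l.take 2) ∈ K2 then some (String.ofList (l.take 2))
      else if String.ofList (l.take 1) ∈ K1 then some (String.ofList (l.take 1))
      else none := by
  rw [keysB_eq, List.find?_append, List.find?_append, List.find?_append,
      find_const_len 4 K4 len_K4, find_const_len 3 K3 len_K3,
      find_const_len 2 K2 len_K2, find_const_len 1 K1 len_K1]
  split_ifs <;> simp [Option.or]

theorem step_eq (l : List Char) :
    keysB.find? (fun k => k.toList.isPrefixOf l) =
      Option.map (fun (p : String × Nat) => String.ofList (l.take p.2)) (tryLens l [4, 3, 2, 1]) := by
  rw [findB, tryLens_all]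
  split_ifs <;> rfl

theorem tryLens_spec (l : List Char) (kana : String) (L : Nat)
    (h : tryLens l [4, 3, 2, 1] = some (kana, L)) :
    kana = rmapA.getD (String.ofList (l.take L)) "" ∧ 1 ≤ L ∧
      (String.ofList (l.take L)).toList.length = L := by
  rw [tryLens_all] at h
  split_ifs at h with h4 h3 h2 h1
  · simp only [Option.some.injEq, Prod.mk.injEq] at h
    obtain ⟨hk, hL⟩ := h
    subst hL
    exact ⟨hk.symm, by omega, len_K4 _ h4⟩
  · simp only [Option.some.injEq, Prod.mk.injEq] at h
    obtain ⟨hk, hL⟩ := h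
    subst hL
    exact ⟨hk.symm, by omega, len_K3 _ h3⟩
  · simp only [Option.some.injEq, Prod.mk.injEq] at h
    obtain ⟨hk, hL⟩ := h
    subst hL
    exact ⟨hk.symm, by omega, len_K2 _ h2⟩
  · simp only [Option.some.injEq, Prod.mk.injEq] at h
    obtain ⟨hk, hL⟩ := h
    subst hL
    exact ⟨hk.symm, by omega, len_K1 _ h1⟩

theorem chars_join_nil_flatten (xs : List (List Char)) :
    PySem.Chars.join [] xs = xs.flatten := by
  induction xs with
  | nil => simp [PySem.Chars.join_nil]
  | cons a xs ih =>
    cases xs with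
    | nil => simp [PySem.Chars.join_singleton]
    | cons b ys =>
      rw [PySem.Chars.join_cons_cons]
      simp only [List.flatten_cons] at ih ⊢
      rw [ih]
      simp

theorem join_cons (s : String) (xs : List String) :
    (PySem.Str.join "" (s :: xs)).toList = s.toList ++ (PySem.Str.join "" xs).toList := by
  simp [PySem.Str.toList_join, chars_join_nil_flatten]

theorem main_lemma : ∀ (fuel : Nat) (l : List Char), l.length ≤ fuel →
    (PySem.Str.join "" (loopA fuel l)).toList = regexSub fuel l := by
  intro fuel
  induction fuel with
  | zero =>
    intro l _
    simp [loopA, regexSub, PySem.Str.toList_join, PySem.Chars.join_nil]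
  | succ fuel ih =>
    intro l hl
    cases l with
    | nil => simp [loopA, regexSub, PySem.Str.toList_join, PySem.Chars.join_nil]
    | cons c tl =>
      cases htl : tryLens (c :: tl) [4, 3, 2, 1] with
      | none =>
        have hf : keysB.find? (fun k => k.toList.isPrefixOf (c :: tl)) = none := by
          rw [step_eq, htl]; rfl
        rw [loopA, regexSub, htl, hf]
        show (PySem.Str.join "" (String.ofList [c] :: loopA fuel tl)).toList =
          c :: regexSub fuel tl
        rw [join_cons, String.toList_ofList]
        simp only [List.singleton_append, List.cons.injEq, true_and]
        exact ih tl (by simpa using Nat.le_of_succ_le_succ hl)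
      | some p =>
        obtain ⟨kana, L⟩ := p
        obtain ⟨hk, hL1, hlen⟩ := tryLens_spec _ _ _ htl
        have hf : keysB.find? (fun k => k.toList.isPrefixOf (c :: tl)) =
            some (String.ofList ((c :: tl).take L)) := by
          rw [step_eq, htl]; rfl
        rw [loopA, regexSub, htl, hf]
        show (PySem.Str.join "" (kana :: loopA fuel (List.drop L (c :: tl)))).toList =
          (mapB.getD (String.ofList ((c :: tl).take L)) "").toList ++
            regexSub fuel (List.drop ((String.ofList ((c :: tl).take L)).toList.length) (c :: tl))
        rw [hlen, join_cons, hk, mapB_eq]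
        simp only [List.append_cancel_left_eq]
        exact ih _ (by simp only [List.length_drop, List.length_cons] at *; omega)

-- ===== VERDICT (by name: the statement is the Claim_ definition above) =====
theorem romaji_to_hiragana_spec : Claim_equal_romaji_to_hiragana := by
  intro text _
  unfold Spec_romaji_to_hiragana romaji_to_hiragana romaji_to_hiragana_alt
  have h := main_lemma (PySem.Str.lower text).toList.length (PySem.Str.lower text).toList le_rfl
  rw [← h, String.ofList_toList]
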